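-- pv_equiv track=rewrite | github.com/PhilippIcking/AdventOfCode2023 | 13.py | mirror_col_modi
-- ===== SOURCE A (Python) =====
-- def mirror_col_modi(m):
--     for char_cou in range(1, len(m[0])):
--         mir_distance = min(char_cou, len(m[0]) - char_cou)
--         equal_count = 0
--         chars_left = []
--         chars_right = []
--         for x in range(mir_distance):
--             for y in range(len(m)):
--                 chars_left.append(m[y][char_cou - x - 1])
--                 chars_right.append(m[y][char_cou + x])
--         for c in range(len(chars_right)):
--             if chars_left[c] == chars_right[c]:
--                 equal_count += 1
--         if equal_count == (len(chars_right)-1):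
--             return char_cou
--
--     return 0
-- ===== SOURCE B (Python) =====
-- def mirror_col_modi(m):
--     w = len(m[0])
--     cols = list(zip(*m))
--     totals = [0] * w
--     # one pass over all odd-sum column pairs (i, j): each pair belongs to exactly
--     # one candidate split c = (i + j + 1) // 2; accumulate its Hamming distance there
--     for j in range(1, w):
--         for i in range(1 - j % 2, j, 2):
--             totals[(i + j + 1) // 2] += sum(a != b for a, b in zip(cols[i], cols[j]))
--     # then scan the table for the first split with exactly one smudge
--     for c in range(1, w):
--         if totals[c] == 1:
--             return c
--     return 0
-- ===== Notes on version B (the rewrite author's own statement) =====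
-- stated objective: alternative
-- what changed: B inverts the iteration: instead of A's per-split rebuilding of two flattened char lists plus an equality scan, it makes one pass over all odd-index-sum column pairs (i,j), charging each pair's Hamming distance to the unique split c=(i+j+1)//2 in a totals table, and then scans the table for the first entry equal to 1.
-- outside the precondition, e.g. on mirror_col_modi(['aab', 'ab']): A returns 1, B raises IndexError; on mirror_col_modi(['abc', 'ab']): A raises IndexError, B raises IndexError
import Mathlib
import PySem

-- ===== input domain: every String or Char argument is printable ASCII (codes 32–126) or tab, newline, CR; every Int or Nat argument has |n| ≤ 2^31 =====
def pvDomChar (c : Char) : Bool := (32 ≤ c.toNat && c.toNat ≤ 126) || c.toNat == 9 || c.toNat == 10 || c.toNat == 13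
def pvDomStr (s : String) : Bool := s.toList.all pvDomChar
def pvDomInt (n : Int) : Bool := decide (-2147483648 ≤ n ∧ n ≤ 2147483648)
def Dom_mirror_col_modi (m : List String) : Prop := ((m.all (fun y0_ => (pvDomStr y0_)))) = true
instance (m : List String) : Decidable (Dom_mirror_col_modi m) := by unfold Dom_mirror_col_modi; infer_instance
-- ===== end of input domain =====

-- B replaces A's per-split flattened char lists and equality scan by one pass over
-- odd-index-sum column pairs that charges each pair's Hamming distance to its unique
-- split in a totals table, then scans the table: objective 'alternative'.

-- ===== PORT A =====
-- width = len(m[0])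
def pvW (m : List String) : Nat := (m.headD "").length

-- body of A's outer loop for one candidate char_cou = c: build chars_left/chars_right
-- (the y-loop appends one char per row, i.e. a map over the rows), count equal positions,
-- test equal_count == len(chars_right) - 1
def pvA_cond (m : List String) (c : Nat) : Bool :=
  let d := min c (pvW m - c)
  let chars_left := (List.range d).foldl (fun acc x =>
      acc ++ (List.range m.length).map (fun y => ((m.getD y "").toList.getD (c - x - 1) ' '))) []
  let chars_right := (List.range d).foldl (fun acc x =>
      acc ++ (List.range m.length).map (fun y => ((m.getD y "").toList.getD (c + x) ' '))) []
  let equal_count := (List.range chars_right.length).foldl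
      (fun acc i => if chars_left.getD i ' ' == chars_right.getD i ' ' then acc + 1 else acc) 0
  equal_count == chars_right.length - 1

-- 'for char_cou in range(1, w): … return char_cou … return 0' (first hit wins)
def pvA_loop (m : List String) : List Nat → Int
  | [] => 0
  | c :: rest => if pvA_cond m c then (c : Int) else pvA_loop m rest

def mirror_col_modi (m : List String) : Int :=
  pvA_loop m (List.range' 1 (pvW m - 1))

-- ===== PORT B =====
-- list(zip(*m)): number of columns = min row length; column i = tuple of row[i]
def pvMinLen (m : List String) : Nat := ((m.map String.length).min?).getD 0

def pvCols (m : List String) : List (List Char) :=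
  (List.range (pvMinLen m)).map (fun i => m.map (fun s => s.toList.getD i ' '))

-- sum(a != b for a, b in zip(cols[i], cols[j])): Hamming distance of two columns
def pvDist (a b : List Char) : Nat := ((a.zip b).countP (fun p => !(p.1 == p.2)))

-- range(1 - j % 2, j, 2): hand port, exact here (start 0 or 1 ≤ j, step 2)
def pvStride (j : Nat) : List Nat :=
  List.range' (1 - j % 2) ((j - (1 - j % 2) + 1) / 2) 2

-- the pair pass: totals[(i+j+1)//2] += dist(cols[i], cols[j]) over j in range(1,w), i in stride(j)
def pvB_totals (cols : List (List Char)) (w : Nat) : List Nat :=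
  (List.range' 1 (w - 1)).foldl (fun totals j =>
    (pvStride j).foldl (fun t i =>
      t.set ((i + j + 1) / 2)
        (t.getD ((i + j + 1) / 2) 0 + pvDist (cols.getD i []) (cols.getD j []))) totals)
    (List.replicate w 0)

-- 'for c in range(1, w): if totals[c] == 1: return c; return 0'
def pvB_scan (totals : List Nat) : List Nat → Int
  | [] => 0
  | c :: rest => if totals.getD c 0 == 1 then (c : Int) else pvB_scan totals rest

def mirror_col_modi_alt (m : List String) : Int :=
  pvB_scan (pvB_totals (pvCols m) (m.headD "").length)
    (List.range' 1 ((m.headD "").length - 1))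

-- ===== PRECONDITION & SPEC =====
-- Pre_ excludes the empty grid (A raises IndexError on m[0]) and ragged grids whose first
-- row has width ≥ 2 with some shorter row, on which A usually raises IndexError (its rare
-- accidental early returns there are excluded with it).
def Pre_mirror_col_modi (m : List String) : Prop :=
  m ≠ [] ∧ (pvW m ≤ 1 ∨ ∀ s ∈ m, pvW m ≤ s.length)
instance (m : List String) : Decidable (Pre_mirror_col_modi m) := by
  unfold Pre_mirror_col_modi; infer_instance

def pvWitness_mirror_col_modi : List String := ["#..#", "#..#", "##.#"]

def Spec_mirror_col_modi (m : List String) (out : Int) : Prop := out = mirror_col_modi_alt m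
instance (m : List String) (out : Int) : Decidable (Spec_mirror_col_modi m out) := by
  unfold Spec_mirror_col_modi; infer_instance

-- ===== CLAIM (what is proved, stated in full; the proofs are below) =====
def Claim_equal_mirror_col_modi : Prop := ∀ (m : List String), Dom_mirror_col_modi m → Pre_mirror_col_modi m → Spec_mirror_col_modi m (mirror_col_modi m)

-- ===== LEMMAS AND PROOFS =====

-- column i of the grid, rows truncated/padded never reached on admitted inputs
def pvColFun (m : List String) (i : Nat) : List Char :=
  m.map (fun s => s.toList.getD i ' ')

-- total number of smudges at split c (the value both conditions test against 1)
def pvMis (m : List String) (c : Nat) : Nat :=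
  ((List.range (min c (pvW m - c))).map
    (fun x => pvDist (pvColFun m (c - x - 1)) (pvColFun m (c + x)))).sum

-- indexing the rows by range = mapping over the rows
lemma pv_map_range_getD {α β : Type} (m : List α) (d0 : α) (f : α → β) :
    (List.range m.length).map (fun y => f (m.getD y d0)) = m.map f := by
  induction m with
  | nil => simp
  | cons a t ih =>
      simp only [List.length_cons, List.range_succ_eq_map, List.map_cons, List.map_map]
      refine congrArg (f a :: ·) ?_
      simpa [Function.comp] using ih

lemma pv_foldl_if {α : Type} (p : α → Bool) (l : List α) (s : Nat) :
    l.foldl (fun acc x => if p x then acc + 1 else acc) s = s + l.countP p := by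
  induction l generalizing s with
  | nil => simp
  | cons x xs ih =>
      by_cases h : p x = true
      · simp [h, ih]
        omega
      · simp [h, ih]

-- the counting loop over indices = countP over the zip (equal lengths)
lemma pv_count_idx (L R : List Char) (h : L.length = R.length) :
    (List.range R.length).foldl
      (fun acc i => if L.getD i ' ' == R.getD i ' ' then acc + 1 else acc) 0
    = (L.zip R).countP (fun p => p.1 == p.2) := by
  rw [pv_foldl_if, Nat.zero_add]
  have key : ∀ (n : Nat) (L R : List Char), L.length = n → R.length = n →
      (List.range n).countP (fun i => L.getD i ' ' == R.getD i ' ')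
        = (L.zip R).countP (fun p => p.1 == p.2) := by
    intro n
    induction n with
    | zero =>
        intro L R hL _
        rw [List.length_eq_zero_iff.mp hL]
        simp
    | succ k ih =>
        intro L R hL hR
        cases L with
        | nil => simp at hL
        | cons a L' =>
          cases R with
          | nil => simp at hR
          | cons b R' =>
            rw [List.range_succ_eq_map]
            simp only [List.countP_cons, List.countP_map, List.zip_cons_cons,
              List.getD_cons_zero, List.getD_cons_succ, Function.comp_def]
            rw [ih L' R' (by simpa using hL) (by simpa using hR)]
  exact key R.length L R h rfl

-- zip of concatenations = concatenation of zips (piecewise equal lengths)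
lemma pv_zip_flatMap {α : Type} (l : List α) (g₁ g₂ : α → List Char)
    (h : ∀ x ∈ l, (g₁ x).length = (g₂ x).length) :
    (l.flatMap g₁).zip (l.flatMap g₂) = l.flatMap (fun x => (g₁ x).zip (g₂ x)) := by
  induction l with
  | nil => simp
  | cons a t ih =>
      simp only [List.flatMap_cons]
      rw [List.zip_append (h a (by simp))]
      rw [ih (fun x hx => h x (by simp [hx]))]

lemma pv_countP_flatMap {α : Type} (l : List α) (g : α → List (Char × Char)) (p : Char × Char → Bool) :
    (l.flatMap g).countP p = (l.map (fun x => (g x).countP p)).sum := by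
  induction l with
  | nil => simp
  | cons a t ih => simp [List.flatMap_cons, List.countP_append, ih]

lemma pv_sum_two_maps {α : Type} (l : List α) (f g : α → Nat) (k : Nat)
    (h : ∀ x ∈ l, f x + g x = k) :
    (l.map f).sum + (l.map g).sum = l.length * k := by
  induction l with
  | nil => simp
  | cons a t ih =>
      have ha := h a (by simp)
      have ht := ih (fun x hx => h x (by simp [hx]))
      simp only [List.map_cons, List.sum_cons, List.length_cons]
      ring_nf
      omega

-- columns of the transpose, inside the width
lemma pv_cols_getD (m : List String) (i : Nat) (hi : i < pvMinLen m) :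
    (pvCols m).getD i [] = pvColFun m i := by
  unfold pvCols
  rw [List.getD_eq_getElem?_getD, List.getElem?_map, List.getElem?_range hi]
  rfl

-- under Pre_ every row is at least as long as the first, so zip(*m) has ≥ w columns
lemma pv_w_le_minLen (m : List String) (hne : m ≠ []) (h : ∀ s ∈ m, pvW m ≤ s.length) :
    pvW m ≤ pvMinLen m := by
  unfold pvMinLen
  cases m with
  | nil => exact absurd rfl hne
  | cons a t =>
      have haux : ∀ (l : List Nat) (b : Nat), pvW (a :: t) ≤ b →
          (∀ x ∈ l, pvW (a :: t) ≤ x) → pvW (a :: t) ≤ l.foldl min b := by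
        intro l
        induction l with
        | nil => intro b hb _; simpa using hb
        | cons x xs ihx =>
            intro b hb hl
            simp only [List.foldl_cons]
            exact ihx (min b x) (le_min hb (hl x (by simp)))
              (fun y hy => hl y (by simp [hy]))
      rw [List.map_cons, List.min?_cons', Option.getD_some]
      exact haux _ _ (h a (by simp)) (by
        intro x hx
        rcases List.mem_map.mp hx with ⟨s, hs, rfl⟩
        exact h s (by simp [hs]))

-- A's condition tests exactly 'pvMis = 1'
lemma pvA_cond_iff (m : List String) (hne : m ≠ [])
    (c : Nat) (hc1 : 1 ≤ c) (hc2 : c < pvW m) :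
    pvA_cond m c = (pvMis m c == 1) := by
  set w := pvW m with hw
  set n := m.length with hn
  have hnpos : 0 < n := by
    cases m with
    | nil => exact absurd rfl hne
    | cons a t => simp [hn]
  have hd1 : 1 ≤ min c (w - c) := by omega
  have hdc : min c (w - c) ≤ c := by omega
  set d := min c (w - c) with hd
  have hcollen : ∀ i, (pvColFun m i).length = n := by
    intro i; simp [pvColFun, hn]
  have hmapL : ∀ x : Nat, (List.range n).map
      (fun y => ((m.getD y "").toList.getD (c - x - 1) ' ')) = pvColFun m (c - x - 1) := by
    intro x; exact pv_map_range_getD m "" (fun s => s.toList.getD (c - x - 1) ' ')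
  have hmapR : ∀ x : Nat, (List.range n).map
      (fun y => ((m.getD y "").toList.getD (c + x) ' ')) = pvColFun m (c + x) := by
    intro x; exact pv_map_range_getD m "" (fun s => s.toList.getD (c + x) ' ')
  set L := (List.range d).flatMap (fun x => pvColFun m (c - x - 1)) with hL
  set R := (List.range d).flatMap (fun x => pvColFun m (c + x)) with hR
  have hLlen : L.length = d * n := by
    simp [hL, List.length_flatMap, hcollen, Nat.mul_comm]
  have hRlen : R.length = d * n := by
    simp [hR, List.length_flatMap, hcollen, Nat.mul_comm]
  have hzip : L.zip R
      = (List.range d).flatMap (fun x => (pvColFun m (c - x - 1)).zip (pvColFun m (c + x))) := by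
    rw [hL, hR]
    exact pv_zip_flatMap _ _ _ (by intro x _; rw [hcollen, hcollen])
  set E := ((List.range d).map
      (fun x => ((pvColFun m (c - x - 1)).zip (pvColFun m (c + x))).countP
        (fun p => p.1 == p.2))).sum with hE
  have hNval : pvMis m c = ((List.range d).map
      (fun x => ((pvColFun m (c - x - 1)).zip (pvColFun m (c + x))).countP
        (fun p => !(p.1 == p.2)))).sum := by
    rw [hd, hw]; rfl
  have hEN : E + pvMis m c = d * n := by
    rw [hE, hNval]
    have := pv_sum_two_maps (List.range d)
      (fun x => ((pvColFun m (c - x - 1)).zip (pvColFun m (c + x))).countP (fun p => p.1 == p.2))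
      (fun x => ((pvColFun m (c - x - 1)).zip (pvColFun m (c + x))).countP (fun p => !(p.1 == p.2)))
      n (by
        intro x _
        dsimp only
        have hlen : ((pvColFun m (c - x - 1)).zip (pvColFun m (c + x))).length = n := by
          simp [List.length_zip, hcollen]
        have hsplit := List.length_eq_countP_add_countP (fun p : Char × Char => p.1 == p.2)
          (l := (pvColFun m (c - x - 1)).zip (pvColFun m (c + x)))
        have hpred : (fun a : Char × Char => decide ¬((a.1 == a.2) = true))
            = (fun p : Char × Char => !(p.1 == p.2)) := by
          funext a; by_cases hpa : (a.1 == a.2) = true <;> simp [hpa]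
        rw [hpred] at hsplit
        omega)
    simpa [List.length_range] using this
  -- evaluate A's condition
  have hA : pvA_cond m c = (E == d * n - 1) := by
    unfold pvA_cond
    simp only [← hw, ← hn, ← hd]
    simp only [hmapL, hmapR, PySem.List.foldl_append_eq_flatMap, List.nil_append,
      ← hL, ← hR]
    rw [pv_count_idx L R (by omega), hzip,
      pv_countP_flatMap (List.range d)
        (fun x => (pvColFun m (c - x - 1)).zip (pvColFun m (c + x)))
        (fun p => p.1 == p.2), ← hE, hRlen]
  rw [hA, Bool.eq_iff_iff]
  simp only [beq_iff_eq]
  have hdnpos : 1 ≤ d * n := Nat.mul_pos hd1 hnpos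
  omega

-- nested fold = fold over the flattened pair list
lemma pv_foldl_flatMap {α β γ : Type} (l : List α) (f : α → List β) (g : γ → β → γ) (a : γ) :
    l.foldl (fun a x => (f x).foldl g a) a = (l.flatMap f).foldl g a := by
  induction l generalizing a with
  | nil => rfl
  | cons x xs ih => simp [List.flatMap_cons, List.foldl_append, ih]

-- accounting for the set-fold: each update lands on its own index
lemma pv_set_fold (c : Nat) : ∀ (U : List (Nat × Nat)) (t : List Nat),
    (∀ p ∈ U, p.1 < t.length) → c < t.length →
    (U.foldl (fun t p => t.set p.1 (t.getD p.1 0 + p.2)) t).getD c 0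
      = t.getD c 0 + ((U.filter (fun p => p.1 == c)).map Prod.snd).sum := by
  intro U
  induction U with
  | nil => intro t _ _; simp
  | cons p ps ih =>
      intro t hlt hc
      simp only [List.foldl_cons, List.filter_cons]
      have hlen : (t.set p.1 (t.getD p.1 0 + p.2)).length = t.length := List.length_set
      rw [ih _ (fun q hq => by rw [hlen]; exact hlt q (by simp [hq])) (by omega)]
      have hget : (t.set p.1 (t.getD p.1 0 + p.2)).getD c 0
          = if p.1 = c then t.getD c 0 + p.2 else t.getD c 0 := by
        rw [List.getD_eq_getElem?_getD, List.getElem?_set]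
        by_cases h1 : p.1 = c
        · subst h1
          rw [if_pos rfl, if_pos (hlt p (by simp)), if_pos rfl]
          simp [List.getD_eq_getElem?_getD]
        · rw [if_neg h1, if_neg h1, ← List.getD_eq_getElem?_getD]
      rw [hget]
      by_cases h : p.1 = c
      · rw [if_pos h]
        have hb : (p.1 == c) = true := by simp [h]
        simp only [hb, if_pos trivial, List.map_cons, List.sum_cons]
        omega
      · rw [if_neg h]
        have hb : (p.1 == c) = false := by simp [h]
        simp [hb]

-- sum of filtered-mapped flatMap = sum over outer list of inner filtered sums
lemma pv_sum_filter_flatMap {α β : Type} (l : List α) (f : α → List β)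
    (q : β → Bool) (g : β → Nat) :
    (((l.flatMap f).filter q).map g).sum
      = (l.map (fun x => (((f x).filter q).map g).sum)).sum := by
  induction l with
  | nil => simp
  | cons a t ih => simp [List.flatMap_cons, List.filter_append, ih]

-- membership in the stride: exactly the i < j with i + j odd
lemma pv_mem_stride (i j : Nat) : i ∈ pvStride j ↔ i < j ∧ (i + j) % 2 = 1 := by
  unfold pvStride
  rw [List.mem_range']
  constructor
  · rintro ⟨k, hk, rfl⟩
    omega
  · intro h
    exact ⟨(i - (1 - j % 2)) / 2, by omega, by omega⟩

lemma pv_filter_unique (p : Nat → Bool) (i0 : Nat) : ∀ (l : List Nat), l.Nodup → i0 ∈ l →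
    (∀ i ∈ l, (p i = true ↔ i = i0)) → l.filter p = [i0] := by
  intro l
  induction l with
  | nil => intro _ h; simp at h
  | cons a t ih =>
      intro hnd hmem hiff
      rw [List.nodup_cons] at hnd
      by_cases h : a = i0
      · subst h
        rw [List.filter_cons_of_pos ((hiff a (by simp)).mpr rfl)]
        have : t.filter p = [] := by
          rw [List.filter_eq_nil_iff]
          intro i hi hp
          exact hnd.1 (((hiff i (by simp [hi])).mp hp) ▸ hi)
        rw [this]
      · have hpa : p a = false := by
          by_contra hb
          exact h ((hiff a (by simp)).mp (by simpa using hb))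
        have hmem' : i0 ∈ t := by
          rcases List.mem_cons.mp hmem with h' | h'
          · exact absurd h'.symm h
          · exact h'
        rw [List.filter_cons_of_neg (by simp [hpa])]
        exact ih hnd.2 hmem' (fun i hi => hiff i (by simp [hi]))

-- evaluate the inner filtered sum for one j: at most one i pairs with split c
lemma pv_T_eval (f : Nat → Nat → Nat) (j c : Nat) (hc : 1 ≤ c) :
    (((pvStride j).filter (fun i => ((i + j + 1) / 2 == c))).map (fun i => f i j)).sum
      = if c ≤ j ∧ j ≤ 2 * c - 1 then f (2 * c - 1 - j) j else 0 := by
  have hnd : (pvStride j).Nodup := by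
    unfold pvStride
    exact List.nodup_range' 2 (by norm_num)
  by_cases h : c ≤ j ∧ j ≤ 2 * c - 1
  · rw [if_pos h]
    have heq : (pvStride j).filter (fun i => ((i + j + 1) / 2 == c)) = [2 * c - 1 - j] := by
      apply pv_filter_unique _ _ _ hnd
      · rw [pv_mem_stride]; omega
      · intro i hi
        rw [pv_mem_stride] at hi
        simp only [beq_iff_eq]
        omega
    rw [heq]; simp
  · rw [if_neg h]
    have heq : (pvStride j).filter (fun i => ((i + j + 1) / 2 == c)) = [] := by
      rw [List.filter_eq_nil_iff]
      intro i hi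
      rw [pv_mem_stride] at hi
      simp only [beq_iff_eq]
      omega
    rw [heq]; simp

-- re-group the per-j contributions into A's mirror-distance sum
lemma pv_outer_sum (f : Nat → Nat → Nat) (c w : Nat) (hc1 : 1 ≤ c) (hc2 : c < w) :
    ((List.range' 1 (w - 1)).map
        (fun j => if c ≤ j ∧ j ≤ 2 * c - 1 then f (2 * c - 1 - j) j else 0)).sum
      = ((List.range (min c (w - c))).map (fun x => f (c - 1 - x) (c + x))).sum := by
  set d := min c (w - c) with hd
  have h1 := @List.range'_append 1 (c - 1) (w - c) 1
  rw [show 1 + 1 * (c - 1) = c from by omega, show c - 1 + (w - c) = w - 1 from by omega] at h1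
  have h2 := @List.range'_append c d (w - c - d) 1
  rw [show c + 1 * d = c + d from by omega, show d + (w - c - d) = w - c from by omega] at h2
  rw [← h1, ← h2, List.map_append, List.map_append, List.sum_append, List.sum_append]
  have hS1 : ((List.range' 1 (c - 1)).map
      (fun j => if c ≤ j ∧ j ≤ 2 * c - 1 then f (2 * c - 1 - j) j else 0)).sum = 0 := by
    apply List.sum_eq_zero
    intro x hx
    rcases List.mem_map.mp hx with ⟨j, hj, rfl⟩
    have hj' := List.mem_range'_1.mp hj
    rw [if_neg (by omega)]
  have hS3 : ((List.range' (c + d) (w - c - d)).map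
      (fun j => if c ≤ j ∧ j ≤ 2 * c - 1 then f (2 * c - 1 - j) j else 0)).sum = 0 := by
    apply List.sum_eq_zero
    intro x hx
    rcases List.mem_map.mp hx with ⟨j, hj, rfl⟩
    have hj' := List.mem_range'_1.mp hj
    rw [if_neg (by omega)]
  rw [hS1, hS3, Nat.zero_add, Nat.add_zero]
  rw [List.range'_eq_map_range, List.map_map]
  refine congrArg List.sum ?_
  apply List.map_congr_left
  intro x hx
  have hx' := List.mem_range.mp hx
  simp only [Function.comp]
  rw [if_pos (by omega), show 2 * c - 1 - (c + x) = c - 1 - x from by omega]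

-- the totals table holds pvMis at every admissible split
lemma pv_totals_getD (m : List String) (hne : m ≠ []) (hrows : ∀ s ∈ m, pvW m ≤ s.length)
    (c : Nat) (hc1 : 1 ≤ c) (hc2 : c < pvW m) :
    (pvB_totals (pvCols m) (pvW m)).getD c 0 = pvMis m c := by
  set w := pvW m with hw
  set cols := pvCols m with hcols
  have hwmin : w ≤ pvMinLen m := by rw [hw]; exact pv_w_le_minLen m hne hrows
  set F : Nat → Nat → Nat := fun i j => pvDist (cols.getD i []) (cols.getD j []) with hF
  set U : Nat → List (Nat × Nat) := fun j => (pvStride j).map (fun i => ((i + j + 1) / 2, F i j)) with hU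
  -- the nested pair loop is the set-fold over the flattened update list
  have h1 : pvB_totals cols w
      = ((List.range' 1 (w - 1)).flatMap U).foldl
          (fun t p => t.set p.1 (t.getD p.1 0 + p.2)) (List.replicate w 0) := by
    unfold pvB_totals
    rw [← pv_foldl_flatMap]
    simp only [hU, List.foldl_map, hF]
  have hidx : ∀ p ∈ (List.range' 1 (w - 1)).flatMap U,
      p.1 < (List.replicate w (0 : Nat)).length := by
    intro p hp
    rw [List.length_replicate]
    rcases List.mem_flatMap.mp hp with ⟨j, hj, hpj⟩
    rw [hU] at hpj
    rcases List.mem_map.mp hpj with ⟨i, hi, rfl⟩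
    have hj' := List.mem_range'_1.mp hj
    have hi' := (pv_mem_stride i j).mp hi
    simp only
    omega
  rw [h1, pv_set_fold c _ _ hidx (by rw [List.length_replicate]; omega)]
  have hz : (List.replicate w (0 : Nat)).getD c 0 = 0 := by
    rw [List.getD_eq_getElem?_getD, List.getElem?_replicate]
    split <;> simp
  rw [hz, Nat.zero_add, pv_sum_filter_flatMap]
  -- per j, the filtered inner sum picks the unique partner of split c
  have h2 : ∀ j ∈ List.range' 1 (w - 1),
      (((U j).filter (fun p => p.1 == c)).map Prod.snd).sum
        = if c ≤ j ∧ j ≤ 2 * c - 1 then F (2 * c - 1 - j) j else 0 := by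
    intro j _
    rw [hU]
    simp only [List.filter_map, List.map_map]
    exact pv_T_eval F j c hc1
  rw [List.map_congr_left h2, pv_outer_sum F c w hc1 hc2]
  -- finally identify the columns of the transpose with the grid's columns
  have h3 : ∀ x ∈ List.range (min c (w - c)),
      F (c - 1 - x) (c + x) = pvDist (pvColFun m (c - x - 1)) (pvColFun m (c + x)) := by
    intro x hx
    have hx' := List.mem_range.mp hx
    rw [hF]
    dsimp only
    rw [show c - 1 - x = c - x - 1 from by omega, hcols,
      pv_cols_getD m (c - x - 1) (by omega), pv_cols_getD m (c + x) (by omega)]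
  rw [List.map_congr_left h3]
  rw [pvMis, ← hw]

-- loop vs table scan
lemma pv_loop_eq (m : List String) (totals : List Nat) (l : List Nat)
    (h : ∀ c ∈ l, pvA_cond m c = (totals.getD c 0 == 1)) :
    pvA_loop m l = pvB_scan totals l := by
  induction l with
  | nil => rfl
  | cons c rest ih =>
      simp only [pvA_loop, pvB_scan, h c (by simp)]
      rw [ih (fun x hx => h x (by simp [hx]))]

-- ===== VERDICT (by name: the statement is the Claim_ definition above) =====
theorem mirror_col_modi_spec : Claim_equal_mirror_col_modi := by
  intro m _ hpre
  unfold Spec_mirror_col_modi mirror_col_modi mirror_col_modi_alt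
  rw [show (m.headD "").length = pvW m from rfl]
  obtain ⟨hne, hdisj⟩ := hpre
  by_cases hw1 : pvW m ≤ 1
  · have h0 : pvW m - 1 = 0 := by omega
    rw [h0]
    rfl
  · have hrows : ∀ s ∈ m, pvW m ≤ s.length := hdisj.resolve_left hw1
    apply pv_loop_eq
    intro c hc
    have hc' := List.mem_range'_1.mp hc
    rw [pvA_cond_iff m hne c hc'.1 (by omega),
      pv_totals_getD m hne hrows c hc'.1 (by omega)]
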